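-- pv_equiv track=rewrite | github.com/bimurto/system-design-interview | 02-advanced/08-distributed-caching/experiment.py | hash_slot
-- ===== SOURCE A (Python) =====
-- def hash_slot(key):
--     """Compute Redis hash slot for a key (CRC16 % 16384)."""
--     import binascii
--     # Redis uses XMODEM CRC16
--     crc = 0
--     for byte in key.encode():
--         crc ^= byte << 8
--         for _ in range(8):
--             if crc & 0x8000:
--                 crc = (crc << 1) ^ 0x1021
--             else:
--                 crc <<= 1
--             crc &= 0xFFFF
--     return crc % 16384
-- ===== SOURCE B (Python) =====
-- # Table-driven CRC16-XMODEM: precompute the 256 per-byte remainders once,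
-- # then one table lookup + shift per byte instead of an 8-iteration bit loop.
-- _CRC16_TABLE = []
-- for _i in range(256):
--     _c = _i << 8
--     for _ in range(8):
--         if _c & 0x8000:
--             _c = ((_c << 1) ^ 0x1021) & 0xFFFF
--         else:
--             _c = (_c << 1) & 0xFFFF
--     _CRC16_TABLE.append(_c)
--
--
-- def hash_slot(key):
--     """Compute Redis hash slot for a key (CRC16 % 16384)."""
--     crc = 0
--     for byte in key.encode():
--         crc = _CRC16_TABLE[(crc >> 8) ^ byte] ^ ((crc << 8) & 0xFFFF)
--     return crc % 16384
-- ===== Notes on version B (the rewrite author's own statement) =====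
-- stated objective: faster
-- what changed: Replaces the per-byte 8-iteration bit loop with the standard table-driven CRC16: a 256-entry remainder table precomputed once at module load, then one table lookup plus shift/xor per byte.
import Mathlib
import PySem

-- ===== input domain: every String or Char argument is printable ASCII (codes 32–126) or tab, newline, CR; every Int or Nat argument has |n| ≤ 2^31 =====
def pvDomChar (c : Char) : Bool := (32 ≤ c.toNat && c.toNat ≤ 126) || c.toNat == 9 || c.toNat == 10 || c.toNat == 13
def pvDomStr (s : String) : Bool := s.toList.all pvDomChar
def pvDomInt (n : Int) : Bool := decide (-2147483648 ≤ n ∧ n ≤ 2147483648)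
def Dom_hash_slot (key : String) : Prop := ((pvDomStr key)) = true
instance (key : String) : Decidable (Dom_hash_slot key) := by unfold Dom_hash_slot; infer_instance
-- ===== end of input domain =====

-- B replaces A's per-byte 8-iteration CRC bit loop by the table-driven CRC16 (256-entry
-- remainder table built once, one lookup + shift/xor per byte); objective: faster (constant factor).
-- key.encode() is ported as key.toList.map Char.toNat, exact on the ASCII domain Dom_hash_slot.

-- ===== PORT A =====
-- one iteration of A's inner `for _ in range(8)` body (branch order as in A, then `crc &= 0xFFFF`)
def crcRound (crc : Nat) : Nat :=
  (if crc &&& 0x8000 ≠ 0 then (crc <<< 1) ^^^ 0x1021 else crc <<< 1) &&& 0xFFFF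

def hash_slot (key : String) : Int :=
  let crc := (key.toList.map Char.toNat).foldl
    (fun crc byte => (List.range 8).foldl (fun c _ => crcRound c) (crc ^^^ (byte <<< 8))) 0
  ((crc % 16384 : Nat) : Int)

-- ===== PORT B =====
-- the module-level table build of Source B: for i in range(256): 8 rounds from i << 8
def crcTable : List Nat :=
  (List.range 256).map (fun i => (List.range 8).foldl (fun c _ => crcRound c) (i <<< 8))

def hash_slot_alt (key : String) : Int :=
  let crc := (key.toList.map Char.toNat).foldl
    (fun crc byte => crcTable.getD ((crc >>> 8) ^^^ byte) 0 ^^^ ((crc <<< 8) &&& 0xFFFF)) 0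
  ((crc % 16384 : Nat) : Int)

-- ===== PRECONDITION & SPEC =====
def Spec_hash_slot (key : String) (out : Int) : Prop := out = hash_slot_alt key
instance (key : String) (out : Int) : Decidable (Spec_hash_slot key out) := by unfold Spec_hash_slot; infer_instance

-- ===== CLAIM (what is proved, stated in full; the proofs are below) =====
def Claim_equal_hash_slot : Prop := ∀ (key : String), Dom_hash_slot key → Spec_hash_slot key (hash_slot key)

-- ===== LEMMAS AND PROOFS =====

-- 8 rounds, the shared inner computation (A runs it per byte, B per table entry)
def crcRounds8 (c : Nat) : Nat := (List.range 8).foldl (fun c _ => crcRound c) c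

theorem crcRounds8_def (c : Nat) :
    crcRounds8 c =
      crcRound (crcRound (crcRound (crcRound (crcRound (crcRound (crcRound (crcRound c))))))) := by
  simp [crcRounds8, List.range_succ]

theorem crcRound_eq (c : Nat) :
    crcRound c = ((c <<< 1) ^^^ (if c.testBit 15 then 0x1021 else 0)) &&& 0xFFFF := by
  have h : c &&& 0x8000 = (c.testBit 15).toNat * 2 ^ 15 := Nat.and_two_pow c 15
  unfold crcRound
  cases hb : c.testBit 15 <;> simp [h, hb]

theorem crcRound_lt (c : Nat) : crcRound c < 65536 := by
  unfold crcRound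
  exact lt_of_le_of_lt Nat.and_le_right (by norm_num)

theorem crcRounds8_lt (c : Nat) : crcRounds8 c < 65536 := by
  rw [crcRounds8_def]; exact crcRound_lt _

theorem shiftLeft_xor (x y k : Nat) : (x ^^^ y) <<< k = (x <<< k) ^^^ (y <<< k) := by
  apply Nat.eq_of_testBit_eq
  intro i
  simp [Nat.testBit_shiftLeft, Nat.testBit_xor, Bool.and_xor_distrib_left]

theorem crcRound_xor (x y : Nat) : crcRound (x ^^^ y) = crcRound x ^^^ crcRound y := by
  rw [crcRound_eq, crcRound_eq, crcRound_eq, ← Nat.and_xor_distrib_right, shiftLeft_xor]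
  congr 1
  rw [Nat.testBit_xor]
  cases hx : x.testBit 15 <;> cases hy : y.testBit 15 <;>
    simp [Nat.xor_assoc, Nat.xor_comm, Nat.xor_left_comm]

theorem crcRounds8_xor (x y : Nat) :
    crcRounds8 (x ^^^ y) = crcRounds8 x ^^^ crcRounds8 y := by
  rw [crcRounds8_def, crcRounds8_def, crcRounds8_def]
  simp only [crcRound_xor]

set_option maxRecDepth 100000 in
theorem crcRounds8_small : ∀ lo : Nat, lo < 256 → crcRounds8 lo = lo <<< 8 := by decide

theorem crcTable_getD {i : Nat} (h : i < 256) :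
    crcTable.getD i 0 = crcRounds8 (i <<< 8) := by
  simp [crcTable, crcRounds8, List.getD_eq_getElem?_getD, h]

-- bit-slice decomposition: xoring the byte into the top 8 bits commutes with splitting c
theorem xor_byte_decomp (c b : Nat) :
    c ^^^ (b <<< 8) = (((c >>> 8) ^^^ b) <<< 8) ^^^ (c &&& 255) := by
  apply Nat.eq_of_testBit_eq
  intro i
  have h255 : (255 : Nat) = 2 ^ 8 - 1 := by norm_num
  by_cases hi : 8 ≤ i
  · simp only [Nat.testBit_xor, Nat.testBit_shiftLeft, Nat.testBit_and, h255,
      Nat.testBit_two_pow_sub_one, Nat.testBit_shiftRight]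
    simp [hi, Nat.add_sub_cancel' hi, Nat.not_lt.mpr hi, Bool.xor_comm]
  · simp only [Nat.testBit_xor, Nat.testBit_shiftLeft, Nat.testBit_and, h255,
      Nat.testBit_two_pow_sub_one, Nat.testBit_shiftRight]
    simp [hi, Nat.lt_of_not_ge hi]

theorem shl_mask (c : Nat) : (c <<< 8) &&& 0xFFFF = (c &&& 255) <<< 8 := by
  apply Nat.eq_of_testBit_eq
  intro i
  have h255 : (255 : Nat) = 2 ^ 8 - 1 := by norm_num
  have hFFFF : (0xFFFF : Nat) = 2 ^ 16 - 1 := by norm_num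
  by_cases hi : 8 ≤ i
  · simp only [Nat.testBit_and, Nat.testBit_shiftLeft, h255, hFFFF,
      Nat.testBit_two_pow_sub_one]
    by_cases hi16 : i < 16 <;> simp [hi, hi16] <;> omega
  · simp only [Nat.testBit_and, Nat.testBit_shiftLeft, h255, hFFFF,
      Nat.testBit_two_pow_sub_one]
    simp [hi]

-- the per-byte step of B equals the per-byte step of A
theorem step_eq (c b : Nat) (hc : c < 65536) (hb : b < 256) :
    crcTable.getD ((c >>> 8) ^^^ b) 0 ^^^ ((c <<< 8) &&& 0xFFFF)
      = crcRounds8 (c ^^^ (b <<< 8)) := by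
  have hhi : c >>> 8 < 256 := by
    rw [Nat.shiftRight_eq_div_pow]; omega
  have hidx : (c >>> 8) ^^^ b < 256 := by
    have := Nat.xor_lt_two_pow (n := 8) hhi hb
    simpa using this
  have hlo : c &&& 255 < 256 :=
    lt_of_le_of_lt Nat.and_le_right (by norm_num)
  rw [crcTable_getD hidx, xor_byte_decomp c b, crcRounds8_xor,
    crcRounds8_small _ hlo, shl_mask]

-- the whole fold agrees, with the invariant crc < 65536
theorem fold_eq : ∀ (bytes : List Nat), (∀ b ∈ bytes, b < 256) →
    ∀ c : Nat, c < 65536 →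
    bytes.foldl (fun crc byte => crcTable.getD ((crc >>> 8) ^^^ byte) 0 ^^^ ((crc <<< 8) &&& 0xFFFF)) c
      = bytes.foldl (fun crc byte => (List.range 8).foldl (fun c _ => crcRound c) (crc ^^^ (byte <<< 8))) c := by
  intro bytes
  induction bytes with
  | nil => intro _ c _; rfl
  | cons b bs ih =>
    intro hall c hc
    simp only [List.foldl_cons]
    have hb : b < 256 := hall b (by simp)
    rw [show (List.range 8).foldl (fun c _ => crcRound c) (c ^^^ (b <<< 8)) = crcRounds8 (c ^^^ (b <<< 8)) from rfl,
      ← step_eq c b hc hb]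
    exact ih (fun x hx => hall x (by simp [hx])) _ (by
      rw [step_eq c b hc hb]; exact crcRounds8_lt _)

-- ===== VERDICT (by name: the statement is the Claim_ definition above) =====
theorem hash_slot_spec : Claim_equal_hash_slot := by
  intro key hdom
  unfold Spec_hash_slot hash_slot hash_slot_alt
  have hb : ∀ b ∈ key.toList.map Char.toNat, b < 256 := by
    intro b hbmem
    rcases List.mem_map.mp hbmem with ⟨ch, hch, rfl⟩
    have := List.all_eq_true.mp hdom ch hch
    simp only [pvDomChar, Bool.or_eq_true, Bool.and_eq_true, decide_eq_true_eq,
      beq_iff_eq] at this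
    omega
  rw [fold_eq _ hb 0 (by norm_num)]
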